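-- pv_equiv track=rewrite | github.com/AyobamiAdebesin/alx_leetcode_solutions | amazon_prep/35-getScoreDifference.py | getScoreDifference
-- ===== SOURCE A (Python) =====
-- def getScoreDifference(points):
--     # sort the points array in descending order
--     points.sort(reverse=True)
--     score_a = 0
--     score_b = 0
--
--     for i in range(len(points)):
--         if i % 2 == 0:
--             score_a += points[i]
--         else:
--             score_b += points[i]
--     return abs(score_a - score_b)
-- ===== SOURCE B (Python) =====
-- def getScoreDifference(points):
--     # sort descending in place (same observable mutation as the original)
--     points.sort(reverse=True)
--     # back-to-front sign-flip fold: after consuming a suffix, acc is that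
--     # suffix's alternating sum (+ first, - second, ...), so at the end acc
--     # is the alternating sum of the whole descending list.
--     acc = 0
--     for x in reversed(points):
--         acc = x - acc
--     return abs(acc)
-- ===== Notes on version B (the rewrite author's own statement) =====
-- stated objective: alternative
-- what changed: Replaces the forward indexed loop with an i%2 parity branch and two bucket sums by a back-to-front traversal of the sorted list with a single sign-flip recurrence acc = x - acc (no indices, no parity test), using the identity that this right fold computes the alternating sum.
import Mathlib
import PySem

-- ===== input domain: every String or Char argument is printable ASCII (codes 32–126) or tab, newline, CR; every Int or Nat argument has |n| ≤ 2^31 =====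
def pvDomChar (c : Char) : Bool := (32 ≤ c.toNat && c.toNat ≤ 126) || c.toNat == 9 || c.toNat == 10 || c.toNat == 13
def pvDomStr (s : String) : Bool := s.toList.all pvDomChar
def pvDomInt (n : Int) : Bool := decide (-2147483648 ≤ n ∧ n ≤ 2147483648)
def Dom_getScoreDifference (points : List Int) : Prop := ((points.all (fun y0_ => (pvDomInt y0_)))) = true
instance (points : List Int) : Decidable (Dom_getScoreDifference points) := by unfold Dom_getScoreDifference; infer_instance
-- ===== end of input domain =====

-- B replaces A's forward indexed loop with its i%2 parity branch and two bucket sums by a back-to-front traversal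
-- with a single sign-flip accumulator acc = x - acc (alternative decomposition, same cost). Both sort the argument
-- in place in Python; the equivalence proved here is about the return value.

-- ===== PORT A =====
-- indices produced by range(len(pts)) are always in range, so pyGetD with default 0 is exact
def getScoreDifference (points : List Int) : Int :=
  let pts := PySem.List.sorted points (fun x => x) true
  let ab := (PySem.List.pyRange 0 (PySem.List.len pts) 1).foldl
    (fun (s : Int × Int) i =>
      if PySem.Int.mod i 2 = 0 then (s.1 + PySem.List.pyGetD pts i 0, s.2)
      else (s.1, s.2 + PySem.List.pyGetD pts i 0)) (0, 0)
  |ab.1 - ab.2|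

-- ===== PORT B =====
-- 'for x in reversed(points)' is a fold over the reversed sorted list
def getScoreDifference_alt (points : List Int) : Int :=
  let pts := PySem.List.sorted points (fun x => x) true
  let acc := pts.reverse.foldl (fun (a : Int) x => x - a) 0
  |acc|

-- ===== PRECONDITION & SPEC =====
def Spec_getScoreDifference (points : List Int) (out : Int) : Prop := out = getScoreDifference_alt points
instance (points : List Int) (out : Int) : Decidable (Spec_getScoreDifference points out) := by unfold Spec_getScoreDifference; infer_instance

-- ===== CLAIM (what is proved, stated in full; the proofs are below) =====
def Claim_equal_getScoreDifference : Prop := ∀ (points : List Int), Dom_getScoreDifference points → Spec_getScoreDifference points (getScoreDifference points)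

-- ===== LEMMAS AND PROOFS =====

-- two-at-a-time characterisations of A's two bucket sums
def pvSumEven : List Int → Int
  | [] => 0
  | [x] => x
  | x :: _ :: t => x + pvSumEven t

def pvSumOdd : List Int → Int
  | [] => 0
  | [_] => 0
  | _ :: y :: t => y + pvSumOdd t

-- used only to drive two-at-a-time induction
def pvPair : List Int → Int
  | [] => 0
  | [x] => x
  | x :: y :: t => x - y + pvPair t

-- A's loop over the suffix t of pts = pre ++ t, with pre.length even
lemma pvLoopA (t : List Int) : ∀ (pre : List Int) (a b : Int), pre.length % 2 = 0 →
    (PySem.List.pyRange (pre.length : Int) ((pre.length : Int) + t.length) 1).foldl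
      (fun (s : Int × Int) i =>
        if PySem.Int.mod i 2 = 0 then (s.1 + PySem.List.pyGetD (pre ++ t) i 0, s.2)
        else (s.1, s.2 + PySem.List.pyGetD (pre ++ t) i 0)) (a, b)
      = (a + pvSumEven t, b + pvSumOdd t) := by
  induction t using pvPair.induct with
  | case1 =>
      intro pre a b _
      simp [PySem.List.pyRange_one_eq_nil, pvSumEven, pvSumOdd]
  | case2 x =>
      intro pre a b hm
      rw [show ((pre.length : Int) + ([x] : List Int).length) = (pre.length : Int) + 1 by simp,
        PySem.List.pyRange_one_cons (by omega), PySem.List.pyRange_one_eq_nil (by omega)]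
      have hmod : PySem.Int.mod (pre.length : Int) 2 = 0 := by
        rw [PySem.Int.mod_eq_emod_of_pos (by norm_num : (0:Int) < 2)]; omega
      have hget : PySem.List.pyGetD (pre ++ [x]) (pre.length : Int) 0 = x := by
        rw [PySem.List.pyGetD_natCast]
        simp [List.getD]
      simp only [List.foldl_cons, List.foldl_nil, if_pos hmod, hget, pvSumEven, pvSumOdd]
      simp
  | case3 x y t ih =>
      intro pre a b hm
      rw [show ((pre.length : Int) + ((x :: y :: t : List Int)).length)
            = (pre.length : Int) + (2 + t.length) by push_cast [List.length_cons]; ring]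
      rw [PySem.List.pyRange_one_cons (by omega), PySem.List.pyRange_one_cons (by omega)]
      have hmod0 : PySem.Int.mod (pre.length : Int) 2 = 0 := by
        rw [PySem.Int.mod_eq_emod_of_pos (by norm_num : (0:Int) < 2)]; omega
      have hmod1 : ¬ PySem.Int.mod ((pre.length : Int) + 1) 2 = 0 := by
        rw [PySem.Int.mod_eq_emod_of_pos (by norm_num : (0:Int) < 2)]; omega
      have hget0 : PySem.List.pyGetD (pre ++ x :: y :: t) (pre.length : Int) 0 = x := by
        rw [PySem.List.pyGetD_natCast]
        simp [List.getD]
      have hget1 : PySem.List.pyGetD (pre ++ x :: y :: t) ((pre.length : Int) + 1) 0 = y := by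
        rw [show ((pre.length : Int) + 1) = ((pre.length + 1 : Nat) : Int) by push_cast; ring,
          PySem.List.pyGetD_natCast]
        simp [List.getD]
      simp only [List.foldl_cons, if_pos hmod0, if_neg hmod1, hget0, hget1]
      have hre : pre ++ x :: y :: t = (pre ++ [x, y]) ++ t := by simp
      have hlen : ((pre.length : Int) + 1 + 1) = (((pre ++ [x, y]).length : Nat) : Int) := by
        simp; omega
      have hend : ((pre.length : Int) + (2 + t.length)) = (((pre ++ [x, y]).length : Nat) : Int) + t.length := by
        simp; omega
      rw [hre, hlen, hend, ih (pre ++ [x, y]) (a + x) (b + y) (by simp; omega)]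
      simp only [pvSumEven, pvSumOdd, Prod.mk.injEq]
      constructor <;> ring

-- the sign-flip right fold computes the alternating sum = even-bucket minus odd-bucket
lemma pvAlt_eq (t : List Int) :
    t.foldr (fun x a => x - a) 0 = pvSumEven t - pvSumOdd t := by
  induction t using pvPair.induct with
  | case1 => simp [pvSumEven, pvSumOdd]
  | case2 x => simp [pvSumEven, pvSumOdd]
  | case3 x y t ih => simp only [List.foldr_cons, pvSumEven, pvSumOdd, ih]; ring

-- ===== VERDICT (by name: the statement is the Claim_ definition above) =====
theorem getScoreDifference_spec : Claim_equal_getScoreDifference := by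
  intro points _
  unfold Spec_getScoreDifference getScoreDifference getScoreDifference_alt
  set pts := PySem.List.sorted points (fun x => x) true with hpts
  have hA := pvLoopA pts [] 0 0 (by simp)
  simp only [List.nil_append, List.length_nil, Nat.cast_zero, zero_add] at hA
  simp only [PySem.List.len_eq, hA, List.foldl_reverse, pvAlt_eq]
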